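-- pv_equiv track=rewrite | github.com/NSombekke/nn-genetic-algorithm | utils.py | chrom_length
-- ===== SOURCE A (Python) =====
-- def chrom_length(num_inputs: int, num_hidden: int|list|tuple, num_outputs: int, bias: bool = True,
--                  num_bits_w: int = 8):
--   """
--   Calculate the length of the chromosome for neural network architecture and number of bits per weight.
--
--   Arguments:
--     num_inputs: The number of inputs to the neural network.
--     num_hidden: The number of hidden layers in the neural network.
--     num_outputs: The number of outputs from the neural network.
--     bias: Whether or not to include bias in the neural network.
--     num_bits_w: The number of bits to be used for each weight (bit-precision).
--
--   Returns:
--     chrom_length: The length of the chromosome.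
--   """
--   layers = flatten_list([num_inputs, num_hidden, num_outputs])
--   num_weights = 0
--   for i in range(len(layers) - 1):
--     num_weights += (layers[i] + 1) * layers[i + 1] if bias else layers[i] * layers[i + 1]
--   chrom_length = num_weights * num_bits_w
--   return chrom_length
--
-- def flatten_list(l: list) -> list:
--   """
--   Flatten a heterogenous list of integers and lists.
--
--   Arguments:
--     l: The list of lists to be flattened.
--
--   Returns:
--     flat_list: The flattened list.
--   """
--   flatten_l = []
--   if isinstance(l, (list, tuple)):
--       for x in l:
--           flatten_l.extend(flatten_list(x))
--   else:
--       flatten_l.append(l)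
--   return flatten_l
-- ===== SOURCE B (Python) =====
-- def chrom_length(num_inputs: int, num_hidden, num_outputs: int, bias: bool = True,
--                  num_bits_w: int = 8):
--   layers = [num_inputs]
--   stack = [num_hidden]
--   while stack:
--     x = stack.pop()
--     if isinstance(x, (list, tuple)):
--       stack.extend(reversed(x))
--     else:
--       layers.append(x)
--   layers.append(num_outputs)
--   total = sum(a * b for a, b in zip(layers, layers[1:]))
--   if bias:
--     total += sum(layers[1:])
--   return total * num_bits_w
-- ===== Notes on version B (the rewrite author's own statement) =====
-- stated objective: simpler
-- what changed: Replaces the index-based loop over range(len(layers)-1) with a zip of adjacent layer pairs, and pulls the bias contribution out of each product into a separate sum(layers[1:]) term; flattening is done with an explicit stack instead of recursion.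
import Mathlib
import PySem

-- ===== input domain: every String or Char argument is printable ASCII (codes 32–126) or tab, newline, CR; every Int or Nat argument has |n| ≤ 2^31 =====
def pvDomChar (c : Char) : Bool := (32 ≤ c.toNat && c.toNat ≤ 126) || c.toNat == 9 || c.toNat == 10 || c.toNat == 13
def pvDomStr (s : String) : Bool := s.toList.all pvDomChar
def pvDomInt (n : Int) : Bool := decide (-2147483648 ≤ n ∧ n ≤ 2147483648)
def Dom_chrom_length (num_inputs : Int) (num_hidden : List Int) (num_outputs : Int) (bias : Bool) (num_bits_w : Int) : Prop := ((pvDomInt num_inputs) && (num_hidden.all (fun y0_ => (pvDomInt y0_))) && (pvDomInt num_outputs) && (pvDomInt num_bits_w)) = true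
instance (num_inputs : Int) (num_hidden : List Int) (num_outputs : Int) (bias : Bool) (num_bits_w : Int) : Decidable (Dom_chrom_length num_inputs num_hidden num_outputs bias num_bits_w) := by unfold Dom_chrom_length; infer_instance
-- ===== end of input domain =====

-- B replaces A's index loop over range(len(layers)-1) by a zip of adjacent pairs plus a
-- separate bias term sum(layers[1:]), and flattens with an explicit stack; same cost, simpler.

-- ===== PORT A =====
-- flatten_list([num_inputs, num_hidden, num_outputs]) at the call's concrete type
-- (num_hidden : List Int): the recursion yields [num_inputs] ++ num_hidden ++ [num_outputs].
def chrom_length (num_inputs : Int) (num_hidden : List Int) (num_outputs : Int) (bias : Bool) (num_bits_w : Int) : Int :=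
  let layers : List Int := [num_inputs] ++ num_hidden ++ [num_outputs]
  let num_weights : Int :=
    (PySem.List.pyRange 0 ((layers.length : Int) - 1) 1).foldl
      (fun acc i => acc +
        (if bias then (PySem.List.pyGetD layers i 0 + 1) * PySem.List.pyGetD layers (i + 1) 0
         else PySem.List.pyGetD layers i 0 * PySem.List.pyGetD layers (i + 1) 0)) 0
  num_weights * num_bits_w

-- ===== PORT B =====
-- B's stack flatten emits num_inputs, then num_hidden left to right, then num_outputs.
def chrom_length_alt (num_inputs : Int) (num_hidden : List Int) (num_outputs : Int) (bias : Bool) (num_bits_w : Int) : Int :=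
  let layers : List Int := num_inputs :: (num_hidden ++ [num_outputs])
  let total : Int := ((layers.zip (layers.drop 1)).map (fun p => p.1 * p.2)).sum
  let total : Int := if bias then total + (layers.drop 1).sum else total
  total * num_bits_w

-- ===== PRECONDITION & SPEC =====
def Spec_chrom_length (num_inputs : Int) (num_hidden : List Int) (num_outputs : Int) (bias : Bool) (num_bits_w : Int) (out : Int) : Prop := out = chrom_length_alt num_inputs num_hidden num_outputs bias num_bits_w
instance (num_inputs : Int) (num_hidden : List Int) (num_outputs : Int) (bias : Bool) (num_bits_w : Int) (out : Int) : Decidable (Spec_chrom_length num_inputs num_hidden num_outputs bias num_bits_w out) := by unfold Spec_chrom_length; infer_instance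

-- ===== CLAIM (what is proved, stated in full; the proofs are below) =====
def Claim_equal_chrom_length : Prop := ∀ (num_inputs : Int) (num_hidden : List Int) (num_outputs : Int) (bias : Bool) (num_bits_w : Int), Dom_chrom_length num_inputs num_hidden num_outputs bias num_bits_w → Spec_chrom_length num_inputs num_hidden num_outputs bias num_bits_w (chrom_length num_inputs num_hidden num_outputs bias num_bits_w)

-- ===== LEMMAS AND PROOFS =====

-- A's loop body over Nat indices, after pyGetD (cast index) reduces to List.getD.
lemma chrom_core (bias : Bool) (xs : List Int) :
    ((List.range (xs.length - 1)).map
        (fun k => if bias then (xs.getD k 0 + 1) * xs.getD (k + 1) 0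
                  else xs.getD k 0 * xs.getD (k + 1) 0)).sum
      = ((xs.zip (xs.drop 1)).map (fun p => p.1 * p.2)).sum
        + (if bias then (xs.drop 1).sum else 0) := by
  induction xs with
  | nil => simp
  | cons a ys ih =>
    cases ys with
    | nil => simp
    | cons b zs =>
      have h : (a :: b :: zs).length - 1 = ((b :: zs).length - 1) + 1 := by
        simp [List.length_cons]
      rw [h, List.range_succ_eq_map, List.map_cons, List.map_map, List.sum_cons]
      have hmap : ((List.range ((b :: zs).length - 1)).map
          ((fun k => if bias then ((a :: b :: zs).getD k 0 + 1) * (a :: b :: zs).getD (k + 1) 0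
                     else (a :: b :: zs).getD k 0 * (a :: b :: zs).getD (k + 1) 0) ∘ Nat.succ))
          = ((List.range ((b :: zs).length - 1)).map
          (fun k => if bias then ((b :: zs).getD k 0 + 1) * (b :: zs).getD (k + 1) 0
                     else (b :: zs).getD k 0 * (b :: zs).getD (k + 1) 0)) := by
        apply List.map_congr_left
        intro k _
        simp [Function.comp]
      rw [hmap, ih]
      cases bias <;> simp [List.zip_cons_cons] <;> ring

theorem chrom_length_spec : Claim_equal_chrom_length := by
  intro ni nh no bias nb _
  unfold Spec_chrom_length chrom_length chrom_length_alt
  have hlayers : [ni] ++ nh ++ [no] = ni :: (nh ++ [no]) := by simp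
  set xs : List Int := ni :: (nh ++ [no]) with hxs
  rw [hlayers]
  dsimp only
  rw [PySem.List.foldl_add]
  rw [PySem.List.pyRange_one]
  rw [List.map_map]
  have hcast : ((List.range (((xs.length : Int) - 1)).toNat).map
      ((fun i => if bias then (PySem.List.pyGetD xs i 0 + 1) * PySem.List.pyGetD xs (i + 1) 0
                 else PySem.List.pyGetD xs i 0 * PySem.List.pyGetD xs (i + 1) 0) ∘ (fun k : Nat => (k : Int))))
      = ((List.range (xs.length - 1)).map
      (fun k => if bias then (xs.getD k 0 + 1) * xs.getD (k + 1) 0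
                else xs.getD k 0 * xs.getD (k + 1) 0)) := by
    have hn : (((xs.length : Int) - 1)).toNat = xs.length - 1 := by omega
    rw [hn]
    apply List.map_congr_left
    intro k _
    have h1 : (k : Int) + 1 = ((k + 1 : Nat) : Int) := by push_cast; ring
    simp only [Function.comp, h1, PySem.List.pyGetD_natCast]
  simp only [sub_zero, zero_add]
  rw [hcast, chrom_core]
  cases bias <;> simp
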